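-- pv_equiv track=rewrite | github.com/kookmin-sw/capstone-2021-18 | object_separating/sim_cluster.py | HttpParser
-- ===== SOURCE A (Python) =====
-- def HttpParser(payload):
--     content = {'20', '2F', '3A', '27', '2C','29', '28', '7D', '7B', '2E','5D','5B', '3B', '3E','3C', '2A', '22', '23', '3D'}
--     # delimiter by special character
--     ls = []
--     header_body = payload.split('0D0A0D0A')
--     ing = header_body[0].split('0D0A')
--     if len(header_body) > 1 and len(header_body[1]) > 0:
--         ing.append(header_body[1])
--     for chunk in ing:
--         word = ""
--         for idx in range(0, len(chunk), 2):
--             if chunk[idx:idx+2] in content and len(word) > 0: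
--                 ls.append(word)
--                 word =""
--             elif chunk[idx:idx+2] in content and len(word) == 0:
--                 pass
--             else:
--                 word += chunk[idx:idx+2]
--         if len(word) > 0:
--             ls.append(word)
--     return ls
-- ===== SOURCE B (Python) =====
-- def _tokens(pairs, content):
--     # run-scanning: skip delimiter pairs, take each maximal run of
--     # non-delimiter pairs as one token
--     out = []
--     while pairs:
--         if pairs[0] in content:
--             pairs = pairs[1:]
--         else:
--             k = 1
--             while k < len(pairs) and pairs[k] not in content:
--                 k += 1
--             out.append(''.join(pairs[:k]))
--             pairs = pairs[k:]
--     return out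
--
--
-- def HttpParser(payload):
--     content = {'20', '2F', '3A', '27', '2C', '29', '28', '7D', '7B', '2E',
--                '5D', '5B', '3B', '3E', '3C', '2A', '22', '23', '3D'}
--     header_body = payload.split('0D0A0D0A')
--     ing = header_body[0].split('0D0A')
--     if len(header_body) > 1 and len(header_body[1]) > 0:
--         ing.append(header_body[1])
--     ls = []
--     for chunk in ing:
--         pairs = [chunk[i:i+2] for i in range(0, len(chunk), 2)]
--         ls += _tokens(pairs, content)
--     return ls
-- ===== Notes on version B (the rewrite author's own statement) =====
-- stated objective: alternative
-- what changed: Replaces A's per-pair word accumulator with its flush-at-delimiter / flush-at-end / skip-empty branches by run-scanning: build the pair list once, then repeatedly skip delimiter pairs and emit each maximal run of non-delimiter pairs as one joined token.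
import Mathlib
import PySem

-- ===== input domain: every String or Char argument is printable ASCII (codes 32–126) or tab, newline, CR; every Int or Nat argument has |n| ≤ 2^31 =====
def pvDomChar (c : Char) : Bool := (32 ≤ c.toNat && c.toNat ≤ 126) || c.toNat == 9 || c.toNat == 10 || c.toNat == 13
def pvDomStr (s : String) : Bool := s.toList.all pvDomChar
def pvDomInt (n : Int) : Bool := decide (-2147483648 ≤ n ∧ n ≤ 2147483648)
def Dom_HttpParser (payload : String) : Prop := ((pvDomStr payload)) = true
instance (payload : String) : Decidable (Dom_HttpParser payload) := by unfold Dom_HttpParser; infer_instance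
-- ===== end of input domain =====

-- B replaces A's per-pair word accumulator (flush-at-delimiter/flush-at-end branches)
-- by run-scanning over the pair list: skip delimiter pairs, emit each maximal run of
-- non-delimiter pairs as one token; same O(n) cost, different decomposition.


-- ===== PORT A =====
-- A's set 'content' (distinct two-char hex codes; only membership is used)
def pvContent : List (List Char) :=
  [['2','0'],['2','F'],['3','A'],['2','7'],['2','C'],['2','9'],['2','8'],['7','D'],['7','B'],
   ['2','E'],['5','D'],['5','B'],['3','B'],['3','E'],['3','C'],['2','A'],['2','2'],['2','3'],['3','D']]

-- A's inner loop over one chunk: state (ls, word), final flush of a nonempty word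
def pvChunkA (ls : List (List Char)) (chunk : List Char) : List (List Char) :=
  let r := (PySem.List.pyRange 0 (chunk.length : Int) 2).foldl
    (fun (st : List (List Char) × List Char) (idx : Int) =>
      if pvContent.contains (PySem.List.slice chunk (some idx) (some (idx + 2))) ∧ 0 < st.2.length then
        (st.1 ++ [st.2], ([] : List Char))
      else if pvContent.contains (PySem.List.slice chunk (some idx) (some (idx + 2))) ∧ st.2.length = 0 then
        st
      else
        (st.1, st.2 ++ PySem.List.slice chunk (some idx) (some (idx + 2)))) (ls, ([] : List Char))
  if 0 < r.2.length then r.1 ++ [r.2] else r.1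

def HttpParser (payload : String) : List String :=
  let hb := PySem.Chars.splitOn payload.toList "0D0A0D0A".toList
  let ing0 := PySem.Chars.splitOn (PySem.List.pyGetD hb 0 []) "0D0A".toList
  let ing := if 1 < hb.length ∧ 0 < (PySem.List.pyGetD hb 1 []).length
             then ing0 ++ [PySem.List.pyGetD hb 1 []] else ing0
  (ing.foldl pvChunkA []).map String.mk

-- ===== PORT B =====
-- the inner 'while k < len(pairs) and pairs[k] not in content' scan: length of the run
def pvRunLen : List (List Char) → Nat
  | [] => 0
  | p :: rest => if pvContent.contains p then 0 else pvRunLen rest + 1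

-- B's while loop over the pair list: skip a delimiter pair, else emit the joined run pairs[:k]
def pvTokens : List (List Char) → List (List Char)
  | [] => []
  | p :: rest =>
    if pvContent.contains p then pvTokens rest
    else (p ++ (rest.take (pvRunLen rest)).flatten) :: pvTokens (rest.drop (pvRunLen rest))
  termination_by ps => ps.length
  decreasing_by
    all_goals simp [List.length_drop]

def HttpParser_alt (payload : String) : List String :=
  let hb := PySem.Chars.splitOn payload.toList "0D0A0D0A".toList
  let ing0 := PySem.Chars.splitOn (PySem.List.pyGetD hb 0 []) "0D0A".toList
  let ing := if 1 < hb.length ∧ 0 < (PySem.List.pyGetD hb 1 []).length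
             then ing0 ++ [PySem.List.pyGetD hb 1 []] else ing0
  (ing.foldl (fun ls chunk =>
      ls ++ pvTokens ((PySem.List.pyRange 0 (chunk.length : Int) 2).map
        (fun i => PySem.List.slice chunk (some i) (some (i + 2))))) []).map String.mk

-- ===== PRECONDITION & SPEC =====
def Spec_HttpParser (payload : String) (out : List String) : Prop := out = HttpParser_alt payload
instance (payload : String) (out : List String) : Decidable (Spec_HttpParser payload out) := by unfold Spec_HttpParser; infer_instance

-- ===== CLAIM (what is proved, stated in full; the proofs are below) =====
def Claim_equal_HttpParser : Prop := ∀ (payload : String), Dom_HttpParser payload → Spec_HttpParser payload (HttpParser payload)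

-- ===== LEMMAS AND PROOFS =====

-- A's step on the pair (already sliced) value
def pvStep (st : List (List Char) × List Char) (p : List Char) : List (List Char) × List Char :=
  if pvContent.contains p ∧ 0 < st.2.length then (st.1 ++ [st.2], ([] : List Char))
  else if pvContent.contains p ∧ st.2.length = 0 then st
  else (st.1, st.2 ++ p)

def pvFlush (st : List (List Char) × List Char) : List (List Char) :=
  if 0 < st.2.length then st.1 ++ [st.2] else st.1

lemma pvStep_delim_pos {p : List Char} (ls : List (List Char)) {w : List Char}
    (hc : p ∈ pvContent) (hw : w ≠ []) : pvStep (ls, w) p = (ls ++ [w], []) := by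
  simp [pvStep, hc, List.length_pos_iff, hw]

lemma pvStep_delim_nil {p : List Char} (ls : List (List Char))
    (hc : p ∈ pvContent) : pvStep (ls, ([] : List Char)) p = (ls, []) := by
  simp [pvStep, hc]

lemma pvStep_plain {p : List Char} (ls : List (List Char)) (w : List Char)
    (hc : p ∉ pvContent) : pvStep (ls, w) p = (ls, w ++ p) := by
  simp [pvStep, hc]

lemma pvFlush_append (a : List (List Char)) (q : List (List Char) × List Char) :
    pvFlush (a ++ q.1, q.2) = a ++ pvFlush q := by
  unfold pvFlush; split_ifs <;> simp

-- ls is only appended to by A's inner loop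
lemma pvStep_prepend (ps : List (List Char)) (ls : List (List Char)) (w : List Char) :
    ps.foldl pvStep (ls, w) = (ls ++ (ps.foldl pvStep ([], w)).1, (ps.foldl pvStep ([], w)).2) := by
  induction ps generalizing ls w with
  | nil => simp
  | cons p ps ih =>
    simp only [List.foldl_cons]
    by_cases hc : p ∈ pvContent
    · by_cases hw : w = []
      · subst hw
        rw [pvStep_delim_nil ls hc, pvStep_delim_nil [] hc]
        exact ih ls []
      · rw [pvStep_delim_pos ls hc hw, pvStep_delim_pos [] hc hw,
            ih (ls ++ [w]) [], ih ([] ++ [w]) []]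
        simp
    · rw [pvStep_plain ls w hc, pvStep_plain [] w hc, ih ls (w ++ p), ih [] (w ++ p)]

-- continuation of A's loop with pending word w, expressed by run-scanning
def pvGlue (w : List Char) (ps : List (List Char)) : List (List Char) :=
  if w = [] then pvTokens ps
  else (w ++ (ps.take (pvRunLen ps)).flatten) :: pvTokens (ps.drop (pvRunLen ps))

lemma pvGlue_eq (ps : List (List Char)) (hne : ∀ p ∈ ps, p ≠ []) (w : List Char) :
    pvFlush (ps.foldl pvStep ([], w)) = pvGlue w ps := by
  induction ps generalizing w with
  | nil =>
    rcases w with _ | ⟨c, cs⟩ <;> simp [pvFlush, pvGlue, pvTokens]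
  | cons p ps ih =>
    have hp : p ≠ [] := hne p (by simp)
    have hne' : ∀ q ∈ ps, q ≠ [] := fun q hq => hne q (by simp [hq])
    simp only [List.foldl_cons]
    by_cases hc : p ∈ pvContent
    · by_cases hw : w = []
      · subst hw
        rw [pvStep_delim_nil [] hc, ih hne' []]
        simp [pvGlue, pvTokens, hc]
      · rw [pvStep_delim_pos [] hc hw, pvStep_prepend, pvFlush_append, ih hne' []]
        simp [pvGlue, hw, pvRunLen, hc, pvTokens]
    · rw [pvStep_plain [] w hc, ih hne' (w ++ p)]
      by_cases hw : w = []
      · subst hw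
        simp [pvGlue, hp, pvTokens, hc]
      · have hwp : w ++ p ≠ [] := by simp [hp]
        simp [pvGlue, hw, hwp, pvRunLen, hc, List.flatten_cons, List.append_assoc]

-- each slice chunk[i:i+2] taken by the loops is a nonempty list
lemma pvSlice_ne_nil (chunk : List Char) (i : Int)
    (h0 : 0 ≤ i) (h1 : i < (chunk.length : Int)) :
    PySem.List.slice chunk (some i) (some (i + 2)) ≠ [] := by
  simp only [PySem.List.slice, PySem.List.clampIdx]
  have hi0 : ¬ i < 0 := by omega
  have hi20 : ¬ i + 2 < 0 := by omega
  simp only [hi0, hi20, if_neg, not_false_iff]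
  intro hcontra
  rw [List.eq_nil_iff_length_eq_zero] at hcontra
  simp only [List.length_take, List.length_drop] at hcontra
  have hiN : i.toNat < chunk.length := by omega
  have h2 : i.toNat + 1 ≤ (i + 2).toNat := by omega
  omega

-- A's per-chunk loop = B's per-chunk run-scan, appended to ls
lemma pvChunk_eq (ls : List (List Char)) (chunk : List Char) :
    pvChunkA ls chunk =
      ls ++ pvTokens ((PySem.List.pyRange 0 (chunk.length : Int) 2).map
        (fun i => PySem.List.slice chunk (some i) (some (i + 2)))) := by
  unfold pvChunkA
  have hfold : (PySem.List.pyRange 0 (chunk.length : Int) 2).foldl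
      (fun (st : List (List Char) × List Char) (idx : Int) =>
        if pvContent.contains (PySem.List.slice chunk (some idx) (some (idx + 2))) ∧ 0 < st.2.length then
          (st.1 ++ [st.2], ([] : List Char))
        else if pvContent.contains (PySem.List.slice chunk (some idx) (some (idx + 2))) ∧ st.2.length = 0 then
          st
        else
          (st.1, st.2 ++ PySem.List.slice chunk (some idx) (some (idx + 2)))) (ls, ([] : List Char))
      = ((PySem.List.pyRange 0 (chunk.length : Int) 2).map
          (fun i => PySem.List.slice chunk (some i) (some (i + 2)))).foldl pvStep (ls, ([] : List Char)) := by
    rw [List.foldl_map]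
    rfl
  simp only [hfold]
  have hne : ∀ p ∈ (PySem.List.pyRange 0 (chunk.length : Int) 2).map
      (fun i => PySem.List.slice chunk (some i) (some (i + 2))), p ≠ [] := by
    intro p hp
    rcases List.mem_map.mp hp with ⟨i, hi, rfl⟩
    rcases (PySem.List.mem_pyRange_iff_of_pos (by norm_num) i).mp hi with ⟨ha, hb, -⟩
    exact pvSlice_ne_nil chunk i ha hb
  rw [pvStep_prepend]
  have key : pvFlush (((PySem.List.pyRange 0 (chunk.length : Int) 2).map
      (fun i => PySem.List.slice chunk (some i) (some (i + 2)))).foldl pvStep ([], ([] : List Char)))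
      = pvTokens ((PySem.List.pyRange 0 (chunk.length : Int) 2).map
          (fun i => PySem.List.slice chunk (some i) (some (i + 2)))) := by
    simpa [pvGlue] using pvGlue_eq _ hne []
  unfold pvFlush at key
  split_ifs with hq
  · rw [List.append_assoc, if_pos hq] at *
    rw [key]
  · rw [if_neg hq] at key
    rw [key]

-- both outer loops, as folds over the same chunk list, agree
lemma pvFoldl_eq (init : List (List Char)) (l : List (List Char)) :
    l.foldl pvChunkA init =
      l.foldl (fun ls chunk =>
        ls ++ pvTokens ((PySem.List.pyRange 0 (chunk.length : Int) 2).map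
          (fun i => PySem.List.slice chunk (some i) (some (i + 2))))) init :=
  PySem.List.foldl_congr_mem _ _ _ _ (fun acc chunk _ => pvChunk_eq acc chunk)

-- ===== VERDICT (by name: the statement is the Claim_ definition above) =====
theorem HttpParser_spec : Claim_equal_HttpParser := by
  intro payload _
  unfold Spec_HttpParser HttpParser HttpParser_alt
  simp only [pvFoldl_eq]
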